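-- pv_equiv track=rewrite | github.com/megumi-ben/work13-wd | gen_workload_v6.py | _split_id_ranges
-- ===== SOURCE A (Python) =====
-- from typing import Any, Dict, List, Optional, Set, Tuple
--
-- def _split_id_ranges(mn: int, mx: int, workers: int) -> List[Tuple[int, int]]:
--     W = max(1, int(workers))
--     if mn > mx:
--         return [(mn, mx)] * W
--     span = mx - mn + 1
--     step = max(1, span // W)
--     ranges: List[Tuple[int, int]] = []
--     cur = mn
--     for i in range(W):
--         lo = cur
--         hi = mx if i == W - 1 else min(mx, lo + step - 1)
--         ranges.append((lo, hi))
--         cur = hi + 1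
--         if cur > mx and i < W - 1:
--             ranges.extend([(mx + 1, mx)] * (W - i - 1))
--             break
--     return ranges
-- ===== SOURCE B (Python) =====
-- from typing import List, Tuple
--
-- def _split_id_ranges(mn: int, mx: int, workers: int) -> List[Tuple[int, int]]:
--     W = max(1, int(workers))
--     if mn > mx:
--         return [(mn, mx)] * W
--     span = mx - mn + 1
--     step = max(1, span // W)
--     return [
--         (
--             min(mn + i * step, mx + 1),
--             mx if i == W - 1 else min(mx, mn + (i + 1) * step - 1),
--         )
--         for i in range(W)
--     ]
-- ===== Notes on version B (the rewrite author's own statement) =====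
-- stated objective: simpler
-- what changed: Replaces A's sequential cursor loop with break-and-pad by a closed-form list comprehension computing each subrange directly from its index.
import Mathlib
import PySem

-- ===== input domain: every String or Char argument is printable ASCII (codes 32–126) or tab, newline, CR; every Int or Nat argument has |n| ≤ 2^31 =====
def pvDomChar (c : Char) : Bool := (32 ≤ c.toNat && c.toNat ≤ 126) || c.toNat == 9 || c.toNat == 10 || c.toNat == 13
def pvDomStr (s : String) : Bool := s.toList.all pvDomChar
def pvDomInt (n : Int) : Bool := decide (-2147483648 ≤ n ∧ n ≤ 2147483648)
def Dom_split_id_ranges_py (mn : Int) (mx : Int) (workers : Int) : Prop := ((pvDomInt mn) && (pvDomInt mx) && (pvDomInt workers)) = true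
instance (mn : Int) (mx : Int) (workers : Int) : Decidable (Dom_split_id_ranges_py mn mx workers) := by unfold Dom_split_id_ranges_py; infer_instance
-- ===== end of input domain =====

-- B replaces A's sequential cursor loop with a break by a closed-form per-index
-- list comprehension (objective: simpler / alternative decomposition, same cost).

-- ===== PORT A =====
-- the for-loop of A: state = (i, cur); the `extend … break` branch is the first `if`
def splitALoop (mx step : Int) (W : Nat) (i : Nat) (cur : Int) : List (Int × Int) :=
  if _h : i < W then
    let lo := cur
    let hi := if i = W - 1 then mx else min mx (lo + step - 1)
    let cur' := hi + 1
    if cur' > mx ∧ i < W - 1 then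
      (lo, hi) :: List.replicate (W - i - 1) (mx + 1, mx)
    else
      (lo, hi) :: splitALoop mx step W (i + 1) cur'
  else []
termination_by W - i

def split_id_ranges_py (mn : Int) (mx : Int) (workers : Int) : List (Int × Int) :=
  let W : Int := max 1 workers
  if mn > mx then List.replicate W.toNat (mn, mx)
  else
    let span := mx - mn + 1
    let step := max 1 (PySem.Int.floordiv span W)
    splitALoop mx step W.toNat 0 mn

-- ===== PORT B =====
def split_id_ranges_py_alt (mn : Int) (mx : Int) (workers : Int) : List (Int × Int) :=
  let W : Int := max 1 workers
  if mn > mx then List.replicate W.toNat (mn, mx)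
  else
    let span := mx - mn + 1
    let step := max 1 (PySem.Int.floordiv span W)
    (List.range W.toNat).map (fun (i : Nat) =>
      (min (mn + (i : Int) * step) (mx + 1),
       if (i : Int) = (W : Int) - 1 then mx else min mx (mn + ((i : Int) + 1) * step - 1)))

-- ===== PRECONDITION & SPEC =====
def Spec_split_id_ranges_py (mn : Int) (mx : Int) (workers : Int) (out : List (Int × Int)) : Prop := out = split_id_ranges_py_alt mn mx workers
instance (mn : Int) (mx : Int) (workers : Int) (out : List (Int × Int)) : Decidable (Spec_split_id_ranges_py mn mx workers out) := by unfold Spec_split_id_ranges_py; infer_instance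

-- ===== CLAIM (what is proved, stated in full; the proofs are below) =====
def Claim_equal_split_id_ranges_py : Prop := ∀ (mn : Int) (mx : Int) (workers : Int), Dom_split_id_ranges_py mn mx workers → Spec_split_id_ranges_py mn mx workers (split_id_ranges_py mn mx workers)

-- ===== LEMMAS AND PROOFS =====

-- closed form of B's i-th pair, over a Nat index
def bPair (mn mx step W : Int) (i : Nat) : Int × Int :=
  (min (mn + (i : Int) * step) (mx + 1),
   if (i : Int) = W - 1 then mx else min mx (mn + ((i : Int) + 1) * step - 1))

lemma bPair_pad (mn mx step W : Int) (i j : Nat) (hstep : 1 ≤ step)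
    (hi : i < j) (hcur : mn + (i : Int) * step + step - 1 ≥ mx) :
    bPair mn mx step W j = (mx + 1, mx) := by
  unfold bPair
  have hij : (i : Int) + 1 ≤ (j : Int) := by exact_mod_cast hi
  have h0 : ((j : Int) - (i : Int) - 1) * step ≥ 0 := mul_nonneg (by omega) (by omega)
  have h0' : ((j : Int) - (i : Int)) * step ≥ 0 := mul_nonneg (by omega) (by omega)
  have hlo : mn + (j : Int) * step ≥ mx + 1 := by nlinarith
  have hhi : mn + ((j : Int) + 1) * step - 1 ≥ mx := by nlinarith
  simp only [Prod.mk.injEq]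
  refine ⟨by omega, ?_⟩
  split_ifs with h
  · rfl
  · omega

lemma splitALoop_eq (mn mx step W₀ : Int) (W : Nat) (hstep : 1 ≤ step) (hWW : (W : Int) = W₀) :
    ∀ n i cur, n = W - i → i < W → cur = mn + (i : Int) * step → cur ≤ mx →
      splitALoop mx step W i cur = (List.range' i (W - i)).map (bPair mn mx step W₀) := by
  intro n
  induction n with
  | zero => intro i cur hn hi _ _; omega
  | succ n ih =>
    intro i cur hn hi hcur hle
    rw [splitALoop]
    rw [dif_pos hi]
    show (if (if i = W - 1 then mx else min mx (cur + step - 1)) + 1 > mx ∧ i < W - 1 then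
            (cur, if i = W - 1 then mx else min mx (cur + step - 1)) ::
              List.replicate (W - i - 1) (mx + 1, mx)
          else
            (cur, if i = W - 1 then mx else min mx (cur + step - 1)) ::
              splitALoop mx step W (i + 1) ((if i = W - 1 then mx else min mx (cur + step - 1)) + 1))
          = List.map (bPair mn mx step W₀) (List.range' i (W - i))
    have hrange : W - i = (W - (i + 1)) + 1 := by omega
    by_cases hlast : i = W - 1
    · -- last iteration: hi = mx, no break, recursion terminates
      have hlZ : (i : Int) = W₀ - 1 := by rw [← hWW]; omega
      rw [if_pos hlast]
      rw [if_neg (by omega : ¬ (mx + 1 > mx ∧ i < W - 1))]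
      rw [splitALoop, dif_neg (by omega : ¬ i + 1 < W)]
      rw [show W - i = 1 from by omega]
      simp only [List.range'_one, List.map_cons, List.map_nil]
      unfold bPair
      rw [if_pos hlZ]
      have hmn : min (mn + (i : Int) * step) (mx + 1) = cur := by omega
      rw [hmn]
    · have h1 : i < W - 1 := by omega
      have hlZ : ¬ ((i : Int) = W₀ - 1) := by rw [← hWW]; omega
      rw [if_neg hlast]
      have estep : mn + ((i : Int) + 1) * step - 1 = cur + step - 1 := by rw [hcur]; ring
      by_cases hbreak : min mx (cur + step - 1) + 1 > mx ∧ i < W - 1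
      · -- break: hi = mx, pad with (mx + 1, mx)
        have hge : cur + step - 1 ≥ mx := by omega
        rw [if_pos hbreak]
        rw [hrange, List.range'_succ, List.map_cons]
        congr 1
        · unfold bPair
          rw [if_neg hlZ, estep]
          rw [min_eq_left (by omega : mn + (i : Int) * step ≤ mx + 1)]
          rw [← hcur]
        · symm
          apply List.eq_replicate_iff.mpr
          refine ⟨by simp, ?_⟩
          intro p hp
          obtain ⟨j, hj, rfl⟩ := List.mem_map.mp hp
          have hjr := List.mem_range'_1.mp hj
          exact bPair_pad mn mx step W₀ i j hstep (by omega) (by rw [← hcur]; omega)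
      · -- continue: hi = cur + step - 1 ≤ mx - 1
        have hmin : min mx (cur + step - 1) = cur + step - 1 := by omega
        rw [if_neg hbreak]
        rw [hrange, List.range'_succ, List.map_cons]
        congr 1
        · unfold bPair
          rw [if_neg hlZ, estep]
          rw [min_eq_left (by omega : mn + (i : Int) * step ≤ mx + 1)]
          rw [← hcur]
        · rw [ih (i + 1) (min mx (cur + step - 1) + 1) (by omega) (by omega)
              (by rw [hmin]; push_cast; rw [hcur]; ring) (by omega)]

-- ===== VERDICT (by name: the statement is the Claim_ definition above) =====
theorem split_id_ranges_py_spec : Claim_equal_split_id_ranges_py := by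
  intro mn mx workers _
  unfold Spec_split_id_ranges_py split_id_ranges_py split_id_ranges_py_alt
  by_cases h : mn > mx
  · simp [h]
  · simp only [h, if_neg, not_false_iff]
    set W : Int := max 1 workers with hW
    set step : Int := max 1 (PySem.Int.floordiv (mx - mn + 1) W) with hstep
    have hW1 : 1 ≤ W := le_max_left _ _
    have hWt : ((W.toNat : Int)) = W := Int.toNat_of_nonneg (by omega)
    have hs1 : 1 ≤ step := le_max_left _ _
    have hpos : 0 < W.toNat := by omega
    rw [splitALoop_eq mn mx step W W.toNat hs1 hWt W.toNat 0 mn (by omega) hpos (by simp) (by omega)]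
    simp only [Nat.sub_zero]
    rw [List.range_eq_range']
    rfl
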